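-- pv_equiv track=rewrite | github.com/zohanubis/study-projects | TriTueNhanTao/Lesson1/ClassExercise/Ex14.py | timCotTichNhoNhat
-- ===== SOURCE A (Python) =====
-- def timCotTichNhoNhat(a):
--     min_tich = float('inf')
--     cot_min = -1
--     for j in range(len(a[0])):
--         tich = 1
--         for i in range(len(a)):
--             tich *= a[i][j]
--         if tich < min_tich:
--             min_tich = tich
--             cot_min = j
--     return cot_min
-- ===== SOURCE B (Python) =====
-- def _prodcol(col):
--     p = 1
--     for x in col:
--         p *= x
--     return p
--
--
-- def timCotTichNhoNhat(a):
--     # transpose the matrix, rank the columns by product with a stable sort,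
--     # and take the first (smallest product, earliest column wins ties)
--     ranked = sorted(((_prodcol(col), j) for j, col in enumerate(zip(*a))),
--                     key=lambda t: t[0])
--     return ranked[0][1] if ranked else -1
-- ===== Notes on version B (the rewrite author's own statement) =====
-- stated objective: alternative
-- what changed: B transposes the matrix (zip(*a)), pairs each column's product with its index, and selects the winner by a stable sort on the product instead of A's nested index loops with an inline running minimum.
import Mathlib
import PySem

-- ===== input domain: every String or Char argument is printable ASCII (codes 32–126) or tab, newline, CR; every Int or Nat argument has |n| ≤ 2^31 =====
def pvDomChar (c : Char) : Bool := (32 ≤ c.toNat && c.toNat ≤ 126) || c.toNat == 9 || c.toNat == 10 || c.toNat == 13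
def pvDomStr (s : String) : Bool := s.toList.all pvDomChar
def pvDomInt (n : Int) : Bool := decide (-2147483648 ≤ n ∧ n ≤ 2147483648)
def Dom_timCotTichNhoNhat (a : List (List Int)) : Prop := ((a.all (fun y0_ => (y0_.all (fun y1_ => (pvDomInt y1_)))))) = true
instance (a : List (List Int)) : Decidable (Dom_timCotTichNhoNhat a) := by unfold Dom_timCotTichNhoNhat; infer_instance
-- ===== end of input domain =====

-- B transposes the matrix and picks the winning column by a stable sort on the column
-- products instead of A's nested index loops with an inline running minimum; same cost class.

-- ===== PORT A =====
-- A's column-major nested loops; float('inf') is modelled by Option Int (none = inf).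
def timCotTichNhoNhat (a : List (List Int)) : Int :=
  let st := (List.range (a.headD []).length).foldl
    (fun (st : Option Int × Int) j =>
      let tich := (List.range a.length).foldl (fun t i => t * ((a.getD i []).getD j 1)) 1
      match st.1 with
      | none => (some tich, (j : Int))
      | some m => if tich < m then (some tich, (j : Int)) else st)
    (none, -1)
  st.2

-- ===== PORT B =====
-- product of one column (helper _prodcol of Source B)
def pvProdCol (col : List Int) : Int := col.foldl (fun p x => p * x) 1

-- hand port of Python's zip(*a): exact — take one element from every row until some row
-- runs out; the loop runs at most len(a[0]) times (row 0 shrinks each step), used as fuel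
def pvZipStarGo : Nat → List (List Int) → List (List Int)
  | 0, _ => []
  | n + 1, a =>
    if _ : a ≠ [] ∧ ∀ row ∈ a, row ≠ [] then
      (a.map (fun r => r.headD 0)) :: pvZipStarGo n (a.map (fun r => r.tail))
    else []

def pvZipStar (a : List (List Int)) : List (List Int) :=
  pvZipStarGo (a.headD []).length a

def timCotTichNhoNhat_alt (a : List (List Int)) : Int :=
  let ranked := PySem.List.sorted
    ((PySem.List.enumerate (pvZipStar a)).map (fun jc => (pvProdCol jc.2, jc.1)))
    (fun t => t.1) false
  match ranked with
  | [] => -1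
  | t :: _ => t.2

-- ===== PRECONDITION & SPEC =====
-- Pre_ excludes the empty matrix (a[0] raises IndexError in A) and ragged matrices with a
-- row shorter than row 0 (a[i][j] raises IndexError in A); A raises on exactly those inputs.
def Pre_timCotTichNhoNhat (a : List (List Int)) : Prop :=
  a ≠ [] ∧ ∀ row ∈ a, (a.headD []).length ≤ row.length
instance (a : List (List Int)) : Decidable (Pre_timCotTichNhoNhat a) := by
  unfold Pre_timCotTichNhoNhat; infer_instance

def pvWitness_timCotTichNhoNhat : List (List Int) := [[2, -1, 3], [1, 4, 0]]

def Spec_timCotTichNhoNhat (a : List (List Int)) (out : Int) : Prop := out = timCotTichNhoNhat_alt a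
instance (a : List (List Int)) (out : Int) : Decidable (Spec_timCotTichNhoNhat a out) := by unfold Spec_timCotTichNhoNhat; infer_instance

-- ===== CLAIM (what is proved, stated in full; the proofs are below) =====
def Claim_equal_timCotTichNhoNhat : Prop := ∀ (a : List (List Int)), Dom_timCotTichNhoNhat a → Pre_timCotTichNhoNhat a → Spec_timCotTichNhoNhat a (timCotTichNhoNhat a)

-- ===== LEMMAS AND PROOFS =====

-- column product, folded over the rows (default 1, as A reads it)
def tcCol (a : List (List Int)) (j : Nat) : Int :=
  a.foldl (fun t row => t * (row.getD j 1)) 1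

-- A's inner index loop computes the row fold
theorem tcA_inner (a : List (List Int)) (j : Nat) :
    (List.range a.length).foldl (fun t i => t * ((a.getD i []).getD j 1)) 1 = tcCol a j := by
  unfold tcCol
  suffices h : ∀ (l : List (List Int)) (init : Int),
      (List.range l.length).foldl (fun t i => t * ((l.getD i []).getD j 1)) init
        = l.foldl (fun t row => t * (row.getD j 1)) init from h a 1
  intro l
  induction l with
  | nil => intro init; simp
  | cons x xs ih =>
    intro init
    simp only [List.length_cons, List.range_succ_eq_map, List.foldl_cons, List.foldl_map,
      List.getD_cons_zero, List.getD_cons_succ]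
    exact ih _

-- zip(*a) on a matrix whose rows all have at least row-0's length w is the list of the w columns
theorem tc_zipStarGo (w : Nat) : ∀ (a : List (List Int)), a ≠ [] →
    (a.headD []).length = w → (∀ row ∈ a, w ≤ row.length) →
    pvZipStarGo w a = (List.range w).map (fun j => a.map (fun r => r.getD j 0)) := by
  induction w with
  | zero =>
    intro a _ _ _
    simp [pvZipStarGo]
  | succ n ih =>
    intro a hne hw hlen
    have hall : ∀ row ∈ a, row ≠ [] := by
      intro row hrow hnil
      have := hlen row hrow
      simp [hnil] at this
    rw [pvZipStarGo, dif_pos ⟨hne, hall⟩]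
    have hmapne : a.map (fun r => r.tail) ≠ [] := by
      cases a with
      | nil => exact absurd rfl hne
      | cons x xs => simp
    have hheadtail : ((a.map (fun r => r.tail)).headD []).length = n := by
      cases a with
      | nil => exact absurd rfl hne
      | cons x xs =>
        simp only [List.map_cons, List.headD_cons, List.length_tail]
        simp only [List.headD_cons] at hw
        omega
    have hlentail : ∀ row ∈ a.map (fun r => r.tail), n ≤ row.length := by
      intro row hrow
      obtain ⟨r, hr, rfl⟩ := List.mem_map.mp hrow
      have := hlen r hr
      simp [List.length_tail]
      omega
    rw [ih _ hmapne hheadtail hlentail]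
    rw [List.range_succ_eq_map]
    simp only [List.map_cons, List.map_map]
    congr 1
    · apply List.map_congr_left
      intro r _
      cases r <;> simp
    · apply List.map_congr_left
      intro j _
      apply List.map_congr_left
      intro r _
      cases r <;> simp

theorem tc_zipStar (w : Nat) (a : List (List Int)) (hne : a ≠ [])
    (hw : (a.headD []).length = w) (hlen : ∀ row ∈ a, w ≤ row.length) :
    pvZipStar a = (List.range w).map (fun j => a.map (fun r => r.getD j 0)) := by
  rw [pvZipStar, hw]
  exact tc_zipStarGo w a hne hw hlen

-- enumerate commutes with map on the values
theorem tc_enum_map_val {α β : Type} (c : α → β) :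
    ∀ (l : List α) (s : Int),
      PySem.List.enumerate (l.map c) s = (PySem.List.enumerate l s).map (fun p => (p.1, c p.2)) := by
  intro l
  induction l with
  | nil => intro s; simp [PySem.List.enumerate_nil]
  | cons x xs ih =>
    intro s
    simp [PySem.List.enumerate_cons, ih]

-- enumerate of range w pairs each index with itself
theorem tc_enum_range : ∀ (w : Nat),
    PySem.List.enumerate (List.range w) 0 = (List.range w).map (fun (j : Nat) => ((j : Int), j)) := by
  intro w
  induction w with
  | zero => simp [PySem.List.enumerate_nil]
  | succ n ih =>
    rw [List.range_succ, PySem.List.enumerate_append, ih]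
    simp [PySem.List.enumerate_cons, PySem.List.enumerate_nil]

theorem tc_enum_map (w : Nat) (c : Nat → List Int) :
    PySem.List.enumerate ((List.range w).map c) 0
      = (List.range w).map (fun (j : Nat) => ((j : Int), c j)) := by
  rw [tc_enum_map_val, tc_enum_range, List.map_map]
  rfl

-- first-minimum step on (product, index) pairs
def pvMinStep (o : Option (Int × Int)) (x : Int × Int) : Option (Int × Int) :=
  match o with
  | none => some x
  | some h => if x.1 < h.1 then some x else some h

theorem tc_head?_insertBy (x : Int × Int) (ys : List (Int × Int)) :
    (PySem.List.insertBy (fun a b => decide (a.1 < b.1)) x ys).head? = pvMinStep ys.head? x := by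
  cases ys with
  | nil => simp [PySem.List.insertBy, pvMinStep]
  | cons y t =>
    simp only [PySem.List.insertBy, pvMinStep, List.head?_cons]
    split_ifs with h <;> simp_all

theorem tc_head?_foldl_insertBy (L : List (Int × Int)) : ∀ (acc : List (Int × Int)),
    (L.foldl (fun acc x => PySem.List.insertBy (fun a b => decide (a.1 < b.1)) x acc) acc).head?
      = L.foldl pvMinStep acc.head? := by
  induction L with
  | nil => intro acc; simp
  | cons x t ih =>
    intro acc
    simp only [List.foldl_cons]
    rw [ih, tc_head?_insertBy]

theorem tc_minFold_some (L : List (Int × Int)) : ∀ (p : Int × Int),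
    ∃ q, L.foldl pvMinStep (some p) = some q := by
  induction L with
  | nil => intro p; exact ⟨p, rfl⟩
  | cons x t ih =>
    intro p
    simp only [List.foldl_cons, pvMinStep]
    split_ifs <;> exact ih _

-- A's running-minimum fold in terms of the first-minimum fold over the pair list
theorem tc_A_fold (L : List (Int × Int)) : ∀ (st : Option Int × Int),
    (L.foldl (fun st x => match st.1 with
        | none => (some x.1, x.2)
        | some m => if x.1 < m then (some x.1, x.2) else st) st)
      = (match L.foldl pvMinStep (st.1.map (fun m => (m, st.2))) with
         | none => st
         | some p => (some p.1, p.2)) := by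
  induction L with
  | nil =>
    intro st
    obtain ⟨o, c⟩ := st
    cases o <;> simp
  | cons x t ih =>
    intro st
    obtain ⟨o, c⟩ := st
    simp only [List.foldl_cons]
    cases o with
    | none =>
      rw [ih]
      simp only [Option.map_none, Option.map_some, pvMinStep]
      obtain ⟨q, hq⟩ := tc_minFold_some t x
      rw [hq]
    | some m =>
      rw [ih]
      simp only [Option.map_some, pvMinStep]
      by_cases hx : x.1 < m
      · simp only [if_pos hx, Option.map_some]
        obtain ⟨q, hq⟩ := tc_minFold_some t x
        rw [hq]
      · simp only [if_neg hx, Option.map_some]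

-- ===== VERDICT (by name: the statement is the Claim_ definition above) =====
theorem timCotTichNhoNhat_spec : Claim_equal_timCotTichNhoNhat := by
  intro a _ hpre
  obtain ⟨hne, hlen⟩ := hpre
  unfold Spec_timCotTichNhoNhat timCotTichNhoNhat timCotTichNhoNhat_alt
  set w := (a.headD []).length with hw
  -- both sides reduce to the same pair list L
  have hzip := tc_zipStar w a hne rfl hlen
  rw [hzip, tc_enum_map, List.map_map]
  have hL : ∀ j ∈ List.range w,
      ((fun jc : Int × List Int => (pvProdCol jc.2, jc.1)) ∘ fun j : Nat => ((j : Int), a.map (fun r => r.getD j 0))) j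
        = (fun j : Nat => (tcCol a j, (j : Int))) j := by
    intro j hj
    have hj' : j < w := List.mem_range.mp hj
    simp only [Function.comp, pvProdCol, tcCol, List.foldl_map]
    congr 1
    apply PySem.List.foldl_congr_mem
    intro acc row hrow
    have hjr : j < row.length := lt_of_lt_of_le hj' (hlen row hrow)
    rw [List.getD_eq_getElem _ _ hjr, List.getD_eq_getElem _ _ hjr]
  rw [List.map_congr_left hL]
  -- A's fold over range w is the fold over the same pair list
  have hA : (List.range w).foldl
      (fun (st : Option Int × Int) j =>
        let tich := (List.range a.length).foldl (fun t i => t * ((a.getD i []).getD j 1)) 1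
        match st.1 with
        | none => (some tich, (j : Int))
        | some m => if tich < m then (some tich, (j : Int)) else st)
      (none, -1)
      = ((List.range w).map (fun j : Nat => (tcCol a j, (j : Int)))).foldl
        (fun (st : Option Int × Int) x => match st.1 with
          | none => (some x.1, x.2)
          | some m => if x.1 < m then (some x.1, x.2) else st)
        (none, -1) := by
    rw [List.foldl_map]
    apply PySem.List.foldl_congr_mem
    intro acc j _
    simp only [tcA_inner]
  simp only [hA]
  set L := (List.range w).map (fun j : Nat => (tcCol a j, (j : Int))) with hLdef
  rw [tc_A_fold]
  -- B's sorted head is the first-minimum fold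
  have hsorted := PySem.List.sorted_eq_foldl_insertBy L (fun t : Int × Int => t.1)
  have hhead : (PySem.List.sorted L (fun t : Int × Int => t.1) false).head?
      = L.foldl pvMinStep none := by
    rw [hsorted, tc_head?_foldl_insertBy]
    rfl
  simp only [Option.map_none]
  cases hR : PySem.List.sorted L (fun t : Int × Int => t.1) false with
  | nil =>
    have hLnil : L = [] := (PySem.List.sorted_eq_nil_iff L _ false).mp hR
    rw [hLnil]
    rfl
  | cons t rest =>
    have : L.foldl pvMinStep none = some t := by
      rw [← hhead, hR]
      rfl
    rw [this]
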